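-- pv_equiv track=rewrite | github.com/the-ride-never-ends/documentation_generator | utils/parser.py | _parse_examples
-- ===== SOURCE A (Python) =====
-- from typing import Dict, List, Any, Optional, Tuple
--
-- def _parse_examples(content: str) -> List[str]:
--     """
--     Parse examples section.
--
--     Args:
--         content: Examples section content
--
--     Returns:
--         List of example code blocks
--     """
--     examples = []
--     current_example = []
--     in_code_block = False
--
--     for line in content.splitlines():
--         stripped = line.strip()
--
--         # In all docstring styles, code examples are often indicated by indentation
--         # or by special syntax like >>> in doctest style examples
--         if stripped.startswith('>>>') or in_code_block:
--             in_code_block = True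
--             current_example.append(line)
--         elif line.startswith('    ') and (not current_example or current_example[-1].startswith('    ')):
--             # Indented block indicates code
--             if not current_example:
--                 in_code_block = True
--             current_example.append(line)
--         else:
--             # End of code block
--             if current_example:
--                 examples.append('\n'.join(current_example))
--                 current_example = []
--                 in_code_block = False
--
--     # Add the last example if there is one
--     if current_example:
--         examples.append('\n'.join(current_example))
--
--     return examples
-- ===== SOURCE B (Python) =====
-- from typing import List
--
-- def _parse_examples(content: str) -> List[str]:
--     lines = content.splitlines()
--     for i, line in enumerate(lines):
--         if line.strip().startswith('>>>') or line.startswith('    '):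
--             return ['\n'.join(lines[i:])]
--     return []
-- ===== Notes on version B (the rewrite author's own statement) =====
-- stated objective: simpler
-- what changed: A's per-line state machine never resets once a block starts, so it emits at most one block; B replaces it with a single scan for the first trigger line ('>>>' after strip, or 4-space indent) and returns the one block from there to end of input.
import Mathlib
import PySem

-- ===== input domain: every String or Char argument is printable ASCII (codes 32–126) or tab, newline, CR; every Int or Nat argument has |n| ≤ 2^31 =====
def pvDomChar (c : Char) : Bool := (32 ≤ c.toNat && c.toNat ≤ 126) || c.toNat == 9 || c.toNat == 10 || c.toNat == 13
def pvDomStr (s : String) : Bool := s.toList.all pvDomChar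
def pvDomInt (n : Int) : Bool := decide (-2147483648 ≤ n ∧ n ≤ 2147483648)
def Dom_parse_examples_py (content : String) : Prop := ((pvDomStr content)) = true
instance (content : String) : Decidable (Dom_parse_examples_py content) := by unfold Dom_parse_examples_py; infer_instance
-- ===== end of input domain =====

-- B replaces A's never-resetting state machine with a scan for the first trigger line (simpler).


-- ===== PORT A =====
-- one loop iteration: state = (examples, current_example, in_code_block)
def parseA_step (st : List String × List String × Bool) (line : String) :
    List String × List String × Bool :=
  let stripped := PySem.Str.strip line
  if PySem.Str.startswith stripped ">>>" || st.2.2 then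
    (st.1, st.2.1 ++ [line], true)
  else if PySem.Str.startswith line "    " &&
      -- current_example[-1]: guarded by nonemptiness, so getLastD's default is never used
      (st.2.1.isEmpty || PySem.Str.startswith (st.2.1.getLastD "") "    ") then
    (st.1, st.2.1 ++ [line], if st.2.1.isEmpty then true else st.2.2)
  else if st.2.1.isEmpty then st
  else (st.1 ++ [PySem.Str.join "\n" st.2.1], [], false)

-- the trailing "add the last example if there is one"
def parseA_finish (st : List String × List String × Bool) : List String :=
  if st.2.1.isEmpty then st.1 else st.1 ++ [PySem.Str.join "\n" st.2.1]

def parse_examples_py (content : String) : List String :=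
  parseA_finish ((PySem.Str.splitlines content).foldl parseA_step ([], [], false))

-- ===== PORT B =====
def altTrig (line : String) : Bool :=
  PySem.Str.startswith (PySem.Str.strip line) ">>>" || PySem.Str.startswith line "    "

-- 'for i, line in enumerate(lines): if trig: return ['\n'.join(lines[i:])]'; l :: ls is lines[i:]
def altGo : List String → List String
  | [] => []
  | l :: ls => if altTrig l then [PySem.Str.join "\n" (l :: ls)] else altGo ls

def parse_examples_py_alt (content : String) : List String :=
  altGo (PySem.Str.splitlines content)

-- ===== PRECONDITION & SPEC =====
def Spec_parse_examples_py (content : String) (out : List String) : Prop := out = parse_examples_py_alt content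
instance (content : String) (out : List String) : Decidable (Spec_parse_examples_py content out) := by unfold Spec_parse_examples_py; infer_instance

-- ===== CLAIM (what is proved, stated in full; the proofs are below) =====
def Claim_equal_parse_examples_py : Prop := ∀ (content : String), Dom_parse_examples_py content → Spec_parse_examples_py content (parse_examples_py content)

-- ===== LEMMAS AND PROOFS =====

-- Once in_code_block is true, every remaining line is appended and the state never resets.
theorem parseA_inblock (lines : List String) : ∀ (ex cur : List String), cur ≠ [] →
    parseA_finish (lines.foldl parseA_step (ex, cur, true)) =
      ex ++ [PySem.Str.join "\n" (cur ++ lines)] := by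
  induction lines with
  | nil =>
      intro ex cur h
      simp [parseA_finish, List.isEmpty_iff, h]
  | cons l ls ih =>
      intro ex cur h
      have hstep : parseA_step (ex, cur, true) l = (ex, cur ++ [l], true) := by
        simp [parseA_step]
      rw [List.foldl_cons, hstep, ih ex (cur ++ [l]) (by simp)]
      simp

-- While scanning (empty current, not in block), a non-trigger line leaves the state unchanged
-- and a trigger line starts the block with [l].
theorem parseA_scan (lines : List String) :
    parseA_finish (lines.foldl parseA_step ([], [], false)) = altGo lines := by
  induction lines with
  | nil => simp [parseA_finish, altGo]
  | cons l ls ih =>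
      by_cases h : altTrig l = true
      · have hstep : parseA_step ([], [], false) l = ([], [l], true) := by
          unfold altTrig at h
          simp at h
          rcases h with h1 | h2
          · simp [parseA_step, h1]
          · by_cases h1 : PySem.Chars.startswith (PySem.Chars.strip l.toList) ['>', '>', '>'] = true
            · simp [parseA_step, h1]
            · simp [parseA_step, h1, h2]
        rw [List.foldl_cons, hstep, parseA_inblock ls [] [l] (by simp)]
        simp [altGo, h]
      · unfold altTrig at h
        simp at h
        obtain ⟨h1, h2⟩ := h
        have hstep : parseA_step ([], [], false) l = ([], [], false) := by
          simp [parseA_step, h1, h2]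
        rw [List.foldl_cons, hstep, ih]
        simp [altGo, altTrig, h1, h2]

-- ===== VERDICT (by name: the statement is the Claim_ definition above) =====
theorem parse_examples_py_spec : Claim_equal_parse_examples_py := by
  intro content _
  unfold Spec_parse_examples_py parse_examples_py parse_examples_py_alt
  exact parseA_scan _
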